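-- pv_equiv track=rewrite | github.com/MrBrantCode/unitest_baseline | mut_generate/mist_train_cf/cf_75387/solution.py | find_smallest_even
-- ===== SOURCE A (Python) =====
-- def find_smallest_even(lst):
--     # Check if the input is a list
--     if type(lst) is not list:
--         return "Error: The provided input is not a list!"
--
--     smallest_even = float('inf')
--     smallest_even_indices = []
--
--     for i in range(len(lst)):
--         # Check if the element in the list is an integer
--         if type(lst[i]) is not int:
--             return "Error: List contains non-integer values!"
--
--         # Check if the number is even and smaller than the current smallest even number
--         if lst[i] % 2 == 0 and lst[i] < smallest_even:
--             smallest_even = lst[i]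
--             smallest_even_indices = [i]   # Reset the list of indices
--         elif lst[i] == smallest_even:
--             smallest_even_indices.append(i)   # Add the index to the list
--
--     # Check if any even number was found
--     if smallest_even == float('inf'):
--         return "No even number found!"
--     else:
--         return smallest_even, smallest_even_indices
-- ===== SOURCE B (Python) =====
-- def find_smallest_even(lst):
--     # Validate first, then reduce, then collect (three separate passes).
--     if type(lst) is not list:
--         return "Error: The provided input is not a list!"
--     if any(type(x) is not int for x in lst):
--         return "Error: List contains non-integer values!"
--     evens = [x for x in lst if x % 2 == 0]
--     if not evens:
--         return "No even number found!"
--     m = min(evens)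
--     return m, [i for i, x in enumerate(lst) if x == m]
-- ===== Notes on version B (the rewrite author's own statement) =====
-- stated objective: simpler
-- what changed: Replaces A's single interleaved running-min loop with explicit index/state bookkeeping by three plain passes: validate, m = min of the even elements, then one comprehension collecting the indices equal to m.
-- outside the precondition, e.g. on find_smallest_even([1, 3]): A returns 'No even number found!', B returns 'No even number found!'
import Mathlib
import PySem

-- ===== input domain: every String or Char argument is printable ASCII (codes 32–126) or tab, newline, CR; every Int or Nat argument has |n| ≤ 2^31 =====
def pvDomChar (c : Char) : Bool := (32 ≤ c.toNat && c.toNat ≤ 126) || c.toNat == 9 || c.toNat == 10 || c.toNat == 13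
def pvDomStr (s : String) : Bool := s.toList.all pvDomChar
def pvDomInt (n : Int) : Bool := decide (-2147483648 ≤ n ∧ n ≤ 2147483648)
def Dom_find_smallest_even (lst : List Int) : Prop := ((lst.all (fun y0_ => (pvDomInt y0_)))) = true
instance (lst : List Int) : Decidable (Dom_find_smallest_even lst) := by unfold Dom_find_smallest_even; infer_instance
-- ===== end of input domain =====

-- B: three plain passes (validate, min of evens, collect indices) instead of A's interleaved
-- running-min loop; same cost, simpler. Equal on lists containing an even element (Pre_).

-- ===== PORT A =====
-- A's loop body. float('inf') is modelled as `none` in the running-minimum slot: the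
-- comparisons `x < inf` (always true) and `x == inf` (always false) become the none branch.
def pvStepA (st : Option Int × List Int) (p : Int × Int) : Option Int × List Int :=
  match st with
  | (none, inds) => if PySem.Int.mod p.2 2 == 0 then (some p.2, [p.1]) else (none, inds)
  | (some m, inds) =>
      if PySem.Int.mod p.2 2 == 0 && decide (p.2 < m) then (some p.2, [p.1])
      else if p.2 == m then (some m, inds ++ [p.1])
      else (some m, inds)

def find_smallest_even (lst : List Int) : Int × List Int :=
  -- for i in range(len(lst)): ... lst[i] ...
  let r := (PySem.List.pyRange 0 (PySem.List.len lst) 1).foldl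
      (fun st j => pvStepA st (j, PySem.List.pyGetD lst j 0)) (none, [])
  match r with
  | (some m, inds) => (m, inds)
  | (none, _) => (0, [])   -- Python returns "No even number found!" here; excluded by Pre_

-- ===== PORT B =====
def find_smallest_even_alt (lst : List Int) : Int × List Int :=
  let evens := lst.filter (fun x => PySem.Int.mod x 2 == 0)
  match PySem.List.min? evens (fun y => y) with
  | some m => (m, (PySem.List.enumerate lst 0).filterMap
      (fun p => if p.2 == m then some p.1 else none))
  | none => (0, [])        -- Python returns "No even number found!" here; excluded by Pre_

-- ===== PRECONDITION & SPEC =====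
-- Pre_ excludes lists with no even element (and would exclude non-lists / non-int elements,
-- which the List Int type already rules out): there A returns an error/"No even" STRING,
-- not a value of the declared pair type, so no equivalence over Int × List Int can mention it.
def Pre_find_smallest_even (lst : List Int) : Prop := ∃ x ∈ lst, PySem.Int.mod x 2 = 0
instance (lst : List Int) : Decidable (Pre_find_smallest_even lst) := by
  unfold Pre_find_smallest_even; infer_instance
def pvWitness_find_smallest_even : List Int := [3, 2, 5, 2]

def Spec_find_smallest_even (lst : List Int) (out : Int × List Int) : Prop := out = find_smallest_even_alt lst
instance (lst : List Int) (out : Int × List Int) : Decidable (Spec_find_smallest_even lst out) := by unfold Spec_find_smallest_even; infer_instance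

-- ===== CLAIM (what is proved, stated in full; the proofs are below) =====
def Claim_equal_find_smallest_even : Prop := ∀ (lst : List Int), Dom_find_smallest_even lst → Pre_find_smallest_even lst → Spec_find_smallest_even lst (find_smallest_even lst)


-- ===== LEMMAS AND PROOFS =====

-- Python's x % 2 is Lean's emod for the positive divisor 2
lemma pvMod2 (x : Int) : PySem.Int.mod x 2 = x % 2 :=
  PySem.Int.mod_eq_emod_of_pos (by norm_num)

-- the even filter both ports use
def pvEvens (lst : List Int) : List Int := lst.filter (fun x => PySem.Int.mod x 2 == 0)

lemma pvEvens_cons_even {x : Int} (t : List Int) (hx : x % 2 = 0) :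
    pvEvens (x :: t) = x :: pvEvens t := by
  simp [pvEvens, List.filter_cons, pvMod2, hx]

lemma pvEvens_cons_odd {x : Int} (t : List Int) (hx : x % 2 = 1) :
    pvEvens (x :: t) = pvEvens t := by
  simp [pvEvens, List.filter_cons, pvMod2, hx]

lemma pvEvens_even {lst : List Int} {y : Int} (h : y ∈ pvEvens lst) : y % 2 = 0 := by
  unfold pvEvens at h
  have := List.of_mem_filter h
  rw [pvMod2] at this
  simpa using this

lemma pvFoldlMin_even {m : Int} {t : List Int} (hm : m % 2 = 0)
    (ht : ∀ y ∈ t, y % 2 = 0) : (t.foldl min m) % 2 = 0 := by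
  rcases PySem.List.foldl_min_mem t m with h | h
  · rw [h]; exact hm
  · exact ht _ h

-- loop invariant: from state (some m, inds) with m even, A's fold computes the running
-- minimum over the even elements of the rest, and the matching index list
lemma pvLoopA (rest : List Int) : ∀ (s m : Int) (inds : List Int),
    m % 2 = 0 →
    (PySem.List.enumerate rest s).foldl pvStepA (some m, inds) =
      (some ((pvEvens rest).foldl min m),
       (if (pvEvens rest).foldl min m = m then inds else []) ++
         (PySem.List.enumerate rest s).filterMap
           (fun p => if p.2 == ((pvEvens rest).foldl min m) then some p.1 else none)) := by
  induction rest with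
  | nil => intro s m inds hm; simp [pvEvens, PySem.List.enumerate_nil]
  | cons x t ih =>
    intro s m inds hm
    rw [PySem.List.enumerate_cons]
    by_cases hx : x % 2 = 0
    · -- x is even
      have hev := pvEvens_cons_even t hx
      by_cases hlt : x < m
      · -- strictly smaller even: reset
        have hstep : pvStepA (some m, inds) (s, x) = (some x, [s]) := by
          simp [pvStepA, pvMod2, hx, hlt]
        have hmin : min m x = x := min_eq_right hlt.le
        have hM : (pvEvens (x :: t)).foldl min m = (pvEvens t).foldl min x := by
          rw [hev]; simp [hmin]
        have hle : (pvEvens t).foldl min x ≤ x := (PySem.List.foldl_min_le _ _).1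
        have hne : (pvEvens t).foldl min x ≠ m := by omega
        rw [List.foldl_cons, hstep, ih (s+1) x [s] hx, hM]
        simp only [List.filterMap_cons, if_neg hne]
        by_cases hxm : (pvEvens t).foldl min x = x
        · simp [hxm]
        · have : (x == (pvEvens t).foldl min x) = false := by
            simp; omega
          simp [hxm, this]
      · by_cases hxm : x = m
        · -- equal to current minimum: append index
          have hstep : pvStepA (some m, inds) (s, x) = (some m, inds ++ [s]) := by
            simp [pvStepA, pvMod2, hx, hlt, hxm]
          have hM : (pvEvens (x :: t)).foldl min m = (pvEvens t).foldl min m := by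
            rw [hev]; simp [hxm]
          rw [List.foldl_cons, hstep, ih (s+1) m (inds ++ [s]) hm, hM]
          simp only [List.filterMap_cons]
          by_cases hMm : (pvEvens t).foldl min m = m
          · simp [hMm, hxm]
          · have : (x == (pvEvens t).foldl min m) = false := by
              simp [hxm]; omega
            simp [hMm, this]
        · -- larger even: unchanged
          have hgt : m < x := by omega
          have hstep : pvStepA (some m, inds) (s, x) = (some m, inds) := by
            simp [pvStepA, pvMod2, hx, hlt, hxm]
          have hmin : min m x = m := min_eq_left hgt.le
          have hM : (pvEvens (x :: t)).foldl min m = (pvEvens t).foldl min m := by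
            rw [hev]; simp [hmin]
          have hle : (pvEvens t).foldl min m ≤ m := (PySem.List.foldl_min_le _ _).1
          have : (x == (pvEvens t).foldl min m) = false := by simp; omega
          rw [List.foldl_cons, hstep, ih (s+1) m inds hm, hM]
          simp only [List.filterMap_cons, this]
          simp
    · -- x is odd: unchanged (x ≠ m since m is even)
      have hx1 : x % 2 = 1 := by have := Int.emod_two_eq x; omega
      have hxm : x ≠ m := by omega
      have hstep : pvStepA (some m, inds) (s, x) = (some m, inds) := by
        simp [pvStepA, pvMod2, hx1, hxm]
      have hev := pvEvens_cons_odd t hx1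
      have hMeven : ((pvEvens t).foldl min m) % 2 = 0 :=
        pvFoldlMin_even hm (fun y hy => pvEvens_even hy)
      have hxM : (x == (pvEvens t).foldl min m) = false := by
        simp; omega
      rw [List.foldl_cons, hstep, ih (s+1) m inds hm, hev]
      simp only [List.filterMap_cons, hxM]
      simp

-- from the initial state, up to the first even element
lemma pvLoopA0 (lst : List Int) : ∀ (s : Int) (x : Int) (ft : List Int),
    pvEvens lst = x :: ft →
    (PySem.List.enumerate lst s).foldl pvStepA (none, []) =
      (some (ft.foldl min x),
       (PySem.List.enumerate lst s).filterMap
         (fun p => if p.2 == ft.foldl min x then some p.1 else none)) := by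
  induction lst with
  | nil => intro s x ft h; simp [pvEvens] at h
  | cons y t ih =>
    intro s x ft h
    rw [PySem.List.enumerate_cons]
    by_cases hy : y % 2 = 0
    · have hev := pvEvens_cons_even t hy
      rw [hev] at h
      obtain ⟨hyx, hft⟩ := List.cons.injEq .. ▸ h
      subst hyx; subst hft
      have hstep : pvStepA (none, ([] : List Int)) (s, y) = (some y, [s]) := by
        simp [pvStepA, pvMod2, hy]
      rw [List.foldl_cons, hstep, pvLoopA t (s+1) y [s] hy]
      simp only [List.filterMap_cons]
      by_cases hMy : (pvEvens t).foldl min y = y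
      · simp [hMy]
      · have hle : (pvEvens t).foldl min y ≤ y := (PySem.List.foldl_min_le _ _).1
        have : (y == (pvEvens t).foldl min y) = false := by
          simp; omega
        simp [hMy, this]
    · have hy1 : y % 2 = 1 := by have := Int.emod_two_eq y; omega
      have hev := pvEvens_cons_odd t hy1
      rw [hev] at h
      have hstep : pvStepA (none, ([] : List Int)) (s, y) = (none, []) := by
        simp [pvStepA, pvMod2, hy1]
      have hMeven : (ft.foldl min x) % 2 = 0 := by
        apply pvFoldlMin_even
        · exact pvEvens_even (lst := t) (h ▸ List.mem_cons_self ..)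
        · intro z hz
          exact pvEvens_even (lst := t) (h ▸ List.mem_cons_of_mem _ hz)
      have hyM : (y == ft.foldl min x) = false := by
        simp; omega
      rw [List.foldl_cons, hstep, ih (s+1) x ft h]
      simp only [List.filterMap_cons, hyM]
      simp

-- ===== VERDICT (by name: the statement is the Claim_ definition above) =====
theorem find_smallest_even_spec : Claim_equal_find_smallest_even := by
  intro lst _ hpre
  unfold Spec_find_smallest_even find_smallest_even find_smallest_even_alt
  -- the even elements are nonempty
  have hne : pvEvens lst ≠ [] := by
    obtain ⟨x, hx, hmod⟩ := hpre
    rw [pvMod2] at hmod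
    intro h
    have : x ∈ pvEvens lst := by
      unfold pvEvens
      exact List.mem_filter.2 ⟨hx, by simp [pvMod2, hmod]⟩
    simp [h] at this
  obtain ⟨x, ft, hev⟩ := List.exists_cons_of_ne_nil hne
  -- turn A's index loop into a fold over enumerate
  rw [show (PySem.List.pyRange 0 (PySem.List.len lst) 1).foldl
      (fun st j => pvStepA st (j, PySem.List.pyGetD lst j 0)) (none, []) =
      (PySem.List.enumerate lst 0).foldl pvStepA (none, []) from by
    rw [PySem.List.enumerate_eq_map_pyRange (d := 0), List.foldl_map]]
  rw [pvLoopA0 lst 0 x ft hev]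
  have hfilter : lst.filter (fun x => PySem.Int.mod x 2 == 0) = x :: ft := hev
  simp only [hfilter, PySem.List.min?_id_cons]
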